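-- pv_equiv track=rewrite | github.com/antoineschieb/chess-bot | utils.py | simplify_line_str
-- ===== SOURCE A (Python) =====
-- def simplify_line_str(line):
--     simplified_line = line  # init
--     for c in range(len(line) - 1):
--         if line[c + 0].isnumeric() and line[c + 1].isnumeric():
--             simplified_line = (
--                 line[:c] + str(int(line[c + 0]) + int(line[c + 1])) + line[c + 2 :]
--             )
--             break
--     if simplified_line == line:
--         return line
--     else:
--         return simplify_line_str(simplified_line)
-- ===== SOURCE B (Python) =====
-- def simplify_line_str(line):
--     # Single pass: each maximal digit run collapses to the digital root of its digit sum (same value as repeated pairwise summation).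
--     out = []
--     run = None
--     for ch in line:
--         if ch.isnumeric():
--             run = (0 if run is None else run) + int(ch)
--         else:
--             if run is not None:
--                 out.append('0' if run == 0 else str(1 + (run - 1) % 9))
--                 run = None
--             out.append(ch)
--     if run is not None:
--         out.append('0' if run == 0 else str(1 + (run - 1) % 9))
--     return ''.join(out)
-- ===== Notes on version B (the rewrite author's own statement) =====
-- stated objective: alternative
-- what changed: B replaces A's repeated rescan-and-rewrite recursion (find first adjacent digit pair, splice in its sum, restart from scratch) by a single left-to-right pass that collapses each maximal digit run to the digital root of its digit sum.
import Mathlib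
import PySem

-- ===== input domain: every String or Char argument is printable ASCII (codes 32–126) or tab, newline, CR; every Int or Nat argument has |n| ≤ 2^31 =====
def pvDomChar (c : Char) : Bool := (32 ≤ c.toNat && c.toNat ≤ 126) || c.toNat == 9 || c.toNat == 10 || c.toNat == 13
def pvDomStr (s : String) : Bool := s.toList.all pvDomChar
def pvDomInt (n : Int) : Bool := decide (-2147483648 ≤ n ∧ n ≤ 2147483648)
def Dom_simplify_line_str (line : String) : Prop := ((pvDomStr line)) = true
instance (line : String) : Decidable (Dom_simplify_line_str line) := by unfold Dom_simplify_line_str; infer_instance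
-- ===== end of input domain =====

-- B collapses each maximal digit run in one pass to the digital root of its digit sum,
-- instead of A's repeated rescan-and-splice recursion (a different algorithm, similar measured cost).
-- On the printable-ASCII domain Dom, str.isnumeric is exactly Char.isDigit and int(c) is c.toNat - 48.

-- ===== PORT A =====
-- str(int(line[c]) + int(line[c+1])) for the two digit chars (exact: int of a digit char is its value)
def pvDigitsAB (a b : Char) : List Char :=
  (PySem.Int.toStr ((a.toNat : Int) - 48 + ((b.toNat : Int) - 48))).toList

-- the for-loop of A: scan c upward, splice at the first adjacent digit pair, else return line unchanged
def pvALoop (l : List Char) (c : Nat) : List Char :=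
  if h : c + 1 < l.length then
    if (l[c]'(Nat.lt_of_succ_lt h)).isDigit && (l[c+1]'h).isDigit then
      l.take c ++ pvDigitsAB (l[c]'(Nat.lt_of_succ_lt h)) (l[c+1]'h) ++ l.drop (c+2)
    else pvALoop l (c+1)
  else l
termination_by l.length - c

-- fuel bound for A's self-recursion (length + digit values strictly decreases each splice);
-- the fuel is only a totality guard: it is proved sufficient in pvARec_eq below
def pvMu (l : List Char) : Nat := (l.map (fun c => if c.isDigit then 1 + (c.toNat - 48) else 1)).sum

-- A's tail recursion: rescan, splice, recurse until the scan changes nothing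
def pvARec : Nat → List Char → List Char
  | 0, l => l
  | fuel + 1, l =>
      let simplified := pvALoop l 0
      if simplified = l then l else pvARec fuel simplified

def simplify_line_str (line : String) : String :=
  String.ofList (pvARec (pvMu line.toList) line.toList)

-- ===== PORT B =====
-- str(1 + (run - 1) % 9) (or '0' for an all-zero run): the digital root as a single char
def pvDRChar (s : Nat) : Char := if s = 0 then '0' else Char.ofNat (48 + (1 + (s - 1) % 9))

-- the single pass of B: state = pending digit-run sum (None outside a run)
def pvAltGo : Option Nat → List Char → List Char
  | none, [] => []
  | some s, [] => [pvDRChar s]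
  | none, c :: rest => if c.isDigit then pvAltGo (some (c.toNat - 48)) rest else c :: pvAltGo none rest
  | some s, c :: rest =>
      if c.isDigit then pvAltGo (some (s + (c.toNat - 48))) rest
      else pvDRChar s :: c :: pvAltGo none rest

def simplify_line_str_alt (line : String) : String := String.ofList (pvAltGo none line.toList)

-- ===== PRECONDITION & SPEC =====
def Spec_simplify_line_str (line : String) (out : String) : Prop := out = simplify_line_str_alt line
instance (line : String) (out : String) : Decidable (Spec_simplify_line_str line out) := by unfold Spec_simplify_line_str; infer_instance

-- ===== CLAIM (what is proved, stated in full; the proofs are below) =====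
def Claim_equal_simplify_line_str : Prop := ∀ (line : String), Dom_simplify_line_str line → Spec_simplify_line_str line (simplify_line_str line)

-- ===== LEMMAS AND PROOFS =====

theorem pvDigit_bounds (a : Char) (h : a.isDigit = true) : 48 ≤ a.toNat ∧ a.toNat ≤ 57 := by
  simp [Char.isDigit] at h; exact h

theorem pvToStr_small (s : Nat) (hs : s ≤ 18) :
    (PySem.Int.toStr (s : Int)).toList =
      if s < 10 then [Char.ofNat (s + 48)] else ['1', Char.ofNat (s + 38)] := by
  interval_cases s <;> decide

theorem pvDigitsAB_eq (a b : Char) (ha : a.isDigit = true) (hb : b.isDigit = true) :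
    pvDigitsAB a b =
      if a.toNat + b.toNat - 96 < 10 then [Char.ofNat (a.toNat + b.toNat - 96 + 48)]
      else ['1', Char.ofNat (a.toNat + b.toNat - 96 + 38)] := by
  have h1 := pvDigit_bounds a ha
  have h2 := pvDigit_bounds b hb
  have he : ((a.toNat : Int) - 48 + ((b.toNat : Int) - 48)) = ((a.toNat + b.toNat - 96 : Nat) : Int) := by
    omega
  rw [pvDigitsAB, he, pvToStr_small _ (by omega)]

theorem pvOfNat_digit (n : Nat) (h1 : 48 ≤ n) (h2 : n ≤ 57) :
    (Char.ofNat n).isDigit = true ∧ (Char.ofNat n).toNat = n := by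
  interval_cases n <;> exact ⟨by decide, by decide⟩

theorem pvMu_append (l₁ l₂ : List Char) : pvMu (l₁ ++ l₂) = pvMu l₁ + pvMu l₂ := by
  simp [pvMu]

theorem pvMu_step (p q : List Char) (a b : Char) (ha : a.isDigit = true) (hb : b.isDigit = true) :
    pvMu (p ++ pvDigitsAB a b ++ q) < pvMu (p ++ a :: b :: q) := by
  have h1 := pvDigit_bounds a ha
  have h2 := pvDigit_bounds b hb
  have hm : pvMu (pvDigitsAB a b) < pvMu [a, b] := by
    rw [pvDigitsAB_eq a b ha hb]
    split
    · have := pvOfNat_digit (a.toNat + b.toNat - 96 + 48) (by omega) (by omega)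
      simp [pvMu, this.1, this.2, ha, hb]; omega
    · have := pvOfNat_digit (a.toNat + b.toNat - 96 + 38) (by omega) (by omega)
      simp [pvMu, this.1, this.2, ha, hb]; omega
  have e1 : pvMu (a :: b :: q) = pvMu [a, b] + pvMu q := by simp [pvMu, Nat.add_assoc]
  simp only [pvMu_append, e1]
  omega

theorem pvDecomp (l : List Char) (c : Nat) (h : c + 1 < l.length) :
    l = l.take c ++ (l[c]'(Nat.lt_of_succ_lt h)) :: (l[c+1]'h) :: l.drop (c+2) := by
  conv_lhs => rw [← List.take_append_drop c l]
  rw [List.drop_eq_getElem_cons (Nat.lt_of_succ_lt h), List.drop_eq_getElem_cons h]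

theorem pvALoop_spec (l : List Char) (c : Nat) :
    (pvALoop l c = l ∧ ∀ i, c ≤ i → ∀ (h : i + 1 < l.length),
        ¬((l[i]'(Nat.lt_of_succ_lt h)).isDigit = true ∧ (l[i+1]'h).isDigit = true))
    ∨ (∃ p a b q, a.isDigit = true ∧ b.isDigit = true ∧ l = p ++ a :: b :: q ∧
        pvALoop l c = p ++ pvDigitsAB a b ++ q) := by
  fun_induction pvALoop l c with
  | case1 c h hd =>
      right
      refine ⟨l.take c, l[c]'(Nat.lt_of_succ_lt h), l[c+1]'h, l.drop (c+2), ?_, ?_,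
        pvDecomp l c h, ?_⟩
      · exact ((Bool.and_eq_true _ _).mp hd).1
      · exact ((Bool.and_eq_true _ _).mp hd).2
      · simp
  | case2 c h hd ih =>
      rcases ih with ⟨he, hp⟩ | ⟨p, a, b, q, ha, hb, hl, hr⟩
      · left
        refine ⟨he, ?_⟩
        intro i hci hi
        rcases Nat.lt_or_ge c i with hlt | hge
        · exact hp i hlt hi
        · have : i = c := by omega
          subst this
          intro ⟨ha, hb⟩
          simp [ha, hb] at hd
      · exact Or.inr ⟨p, a, b, q, ha, hb, hl, hr⟩
  | case3 c h => exact Or.inl ⟨rfl, by intro i hci hi; omega⟩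

theorem pvDRChar_congr (s₁ s₂ : Nat) (hm : s₁ % 9 = s₂ % 9) (hz : s₁ = 0 ↔ s₂ = 0) :
    pvDRChar s₁ = pvDRChar s₂ := by
  unfold pvDRChar
  by_cases h : s₁ = 0
  · simp [h, hz.mp h]
  · have h2 : ¬ s₂ = 0 := fun he => h (hz.mpr he)
    rw [if_neg h, if_neg h2]
    have he : 48 + (1 + (s₁ - 1) % 9) = 48 + (1 + (s₂ - 1) % 9) := by omega
    rw [he]

theorem pvAltGo_congr (q : List Char) (s₁ s₂ : Nat) (hm : s₁ % 9 = s₂ % 9)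
    (hz : s₁ = 0 ↔ s₂ = 0) : pvAltGo (some s₁) q = pvAltGo (some s₂) q := by
  induction q generalizing s₁ s₂ with
  | nil => simp [pvAltGo, pvDRChar_congr s₁ s₂ hm hz]
  | cons c rest ih =>
      by_cases hc : c.isDigit
      · simp only [pvAltGo, hc, if_pos]
        exact ih _ _ (by omega) (by omega)
      · simp [pvAltGo, hc, pvDRChar_congr s₁ s₂ hm hz]

theorem pvAltGo_ext (r₁ r₂ : List Char) (hbase : ∀ st, pvAltGo st r₁ = pvAltGo st r₂)
    (p : List Char) (st : Option Nat) : pvAltGo st (p ++ r₁) = pvAltGo st (p ++ r₂) := by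
  induction p generalizing st with
  | nil => exact hbase st
  | cons x p' ih =>
      cases st with
      | none => by_cases hx : x.isDigit <;> simp [pvAltGo, hx, ih]
      | some t => by_cases hx : x.isDigit <;> simp [pvAltGo, hx, ih]

theorem pvAltGo_step (p : List Char) (st : Option Nat) (a b : Char) (q : List Char)
    (ha : a.isDigit = true) (hb : b.isDigit = true) :
    pvAltGo st (p ++ pvDigitsAB a b ++ q) = pvAltGo st (p ++ a :: b :: q) := by
  rw [List.append_assoc]
  apply pvAltGo_ext
  intro st
  have h1 := pvDigit_bounds a ha
  have h2 := pvDigit_bounds b hb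
  rw [pvDigitsAB_eq a b ha hb]
  split
  · have hd := pvOfNat_digit (a.toNat + b.toNat - 96 + 48) (by omega) (by omega)
    cases st with
    | none =>
        simp only [List.singleton_append, pvAltGo, hd.1, ha, hb, if_pos, hd.2]
        apply pvAltGo_congr <;> omega
    | some t =>
        simp only [List.singleton_append, pvAltGo, hd.1, ha, hb, if_pos, hd.2]
        apply pvAltGo_congr <;> omega
  · have hd := pvOfNat_digit (a.toNat + b.toNat - 96 + 38) (by omega) (by omega)
    cases st with
    | none =>
        simp only [List.cons_append, pvAltGo, ha, hb, hd.1, if_pos, hd.2]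
        simp only [show ('1' : Char).isDigit = true from rfl, if_pos,
          show ('1' : Char).toNat - 48 = 1 from rfl]
        apply pvAltGo_congr <;> omega
    | some t =>
        simp only [List.cons_append, pvAltGo, ha, hb, hd.1, if_pos, hd.2]
        simp only [show ('1' : Char).isDigit = true from rfl, if_pos,
          show ('1' : Char).toNat - 48 = 1 from rfl]
        apply pvAltGo_congr <;> omega

theorem pvDigit_char_eq (a : Char) : Char.ofNat a.toNat = a := by
  exact Char.ofNat_toNat a

theorem pvDRChar_single (a : Char) (h : a.isDigit = true) : pvDRChar (a.toNat - 48) = a := by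
  have hb := pvDigit_bounds a h
  unfold pvDRChar
  by_cases h0 : a.toNat - 48 = 0
  · have : a.toNat = 48 := by omega
    simp only [h0, if_pos]
    rw [show ('0' : Char) = Char.ofNat 48 from rfl, ← this, pvDigit_char_eq a]
  · have he : 48 + (1 + (a.toNat - 48 - 1) % 9) = a.toNat := by omega
    rw [if_neg h0, he, pvDigit_char_eq a]

theorem pvAltGo_fix (l : List Char)
    (H : ∀ i, ∀ (h : i + 1 < l.length),
      ¬((l[i]'(Nat.lt_of_succ_lt h)).isDigit = true ∧ (l[i+1]'h).isDigit = true)) :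
    pvAltGo none l = l := by
  induction l with
  | nil => rfl
  | cons x xs ih =>
      have H' : ∀ i, ∀ (h : i + 1 < xs.length),
          ¬((xs[i]'(Nat.lt_of_succ_lt h)).isDigit = true ∧ (xs[i+1]'h).isDigit = true) := by
        intro i hi
        have := H (i+1) (by simpa using Nat.succ_lt_succ hi)
        simpa using this
      by_cases hx : x.isDigit
      · cases xs with
        | nil => simp [pvAltGo, hx, pvDRChar_single x hx]
        | cons y ys =>
            have hy : ¬ y.isDigit = true := by
              have := H 0 (by simp)
              simp [hx] at this
              simp [this]
            have hys : pvAltGo none (y :: ys) = y :: ys := ih H'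
            have hys' : pvAltGo none ys = ys := by
              simpa [pvAltGo, hy] using hys
            simp [pvAltGo, hx, hy, hys', pvDRChar_single x hx]
      · simp [pvAltGo, hx, ih H']

theorem pvMu_zero (l : List Char) (h : pvMu l = 0) : l = [] := by
  cases l with
  | nil => rfl
  | cons x xs =>
      exfalso
      simp [pvMu] at h
      rcases h with ⟨h1, -⟩
      revert h1
      split <;> simp

theorem pvARec_eq (fuel : Nat) (l : List Char) (hf : pvMu l ≤ fuel) :
    pvARec fuel l = pvAltGo none l := by
  induction fuel generalizing l with
  | zero =>
      have : l = [] := pvMu_zero l (by omega)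
      subst this
      rfl
  | succ fuel ih =>
      rcases pvALoop_spec l 0 with ⟨he, hp⟩ | ⟨p, a, b, q, ha, hb, hl, hr⟩
      · rw [pvARec, he, if_pos rfl]
        exact (pvAltGo_fix l (fun i h => hp i (Nat.zero_le i) h)).symm
      · have hlt : pvMu (pvALoop l 0) < pvMu l := by
          rw [hr]
          conv_rhs => rw [hl]
          exact pvMu_step p q a b ha hb
        have hne : ¬ pvALoop l 0 = l := fun he => by rw [he] at hlt; exact Nat.lt_irrefl _ hlt
        rw [pvARec, if_neg hne, ih _ (by omega), hr, hl,
          pvAltGo_step p none a b q ha hb]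

theorem pvMain (line : String) : simplify_line_str line = simplify_line_str_alt line := by
  rw [simplify_line_str, simplify_line_str_alt, pvARec_eq _ _ (Nat.le_refl _)]

-- ===== VERDICT (by name: the statement is the Claim_ definition above) =====
theorem simplify_line_str_spec : Claim_equal_simplify_line_str := by
  intro line _
  unfold Spec_simplify_line_str
  exact pvMain line
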